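-- pv_equiv track=rewrite | github.com/soy-curd/Bungoo | bungoo.py | genmarkov3
-- ===== SOURCE A (Python) =====
-- def genmarkov3(wordlist):
--     markov = {}
--     w1 = ''
--     w2 = ''
--     w3 = ''
--     for word in wordlist:
--         if w1 and w2 and w3:
--             if (w1, w2, w3) not in markov:
--                 markov[(w1, w2, w3)] = []
--             markov[(w1, w2, w3)].append(word)
--         w1, w2, w3 = w2, w3, word
--     return markov
-- ===== SOURCE B (Python) =====
-- def genmarkov3(wordlist):
--     words = list(wordlist)
--     quads = [(words[i], words[i + 1], words[i + 2], words[i + 3])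
--              for i in range(len(words) - 3)
--              if words[i] and words[i + 1] and words[i + 2]]
--     markov = {}
--     for w1, w2, w3, nxt in quads:
--         markov.setdefault((w1, w2, w3), []).append(nxt)
--     return markov
-- ===== Notes on version B (the rewrite author's own statement) =====
-- stated objective: alternative
-- what changed: Replaces A's single pass with three rolling window variables and a shift assignment by a two-phase computation: first an index-based comprehension over range(len(words)-3) materialises the guarded sliding-window quadruples, then a separate fold fills the dict via setdefault instead of a membership test plus explicit empty-list insertion.
import Mathlib
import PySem

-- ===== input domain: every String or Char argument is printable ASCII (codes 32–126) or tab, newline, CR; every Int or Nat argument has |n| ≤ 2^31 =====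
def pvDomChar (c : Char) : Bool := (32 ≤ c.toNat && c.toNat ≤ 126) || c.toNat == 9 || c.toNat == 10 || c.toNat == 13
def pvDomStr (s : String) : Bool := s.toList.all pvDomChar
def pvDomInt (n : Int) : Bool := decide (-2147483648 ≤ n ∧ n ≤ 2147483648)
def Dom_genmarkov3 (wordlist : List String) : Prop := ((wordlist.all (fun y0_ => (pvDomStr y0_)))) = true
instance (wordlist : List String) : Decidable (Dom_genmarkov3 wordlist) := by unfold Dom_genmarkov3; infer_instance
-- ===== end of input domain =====

-- B replaces A's rolling-window single pass by a two-phase computation (materialise the guarded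
-- sliding-window quadruples by index, then fold them into the dict via setdefault); alternative, not faster.

-- ===== PORT A =====
-- A's loop: state is the dict and the three rolling window variables w1 w2 w3 (Python '' = falsy).
def genmarkov3Loop (markov : PySem.Dict (String × String × String) (List String))
    (w1 w2 w3 : String) : List String → PySem.Dict (String × String × String) (List String)
  | [] => markov
  | word :: rest =>
    let markov' :=
      if w1 ≠ "" ∧ w2 ≠ "" ∧ w3 ≠ "" then
        -- if (w1, w2, w3) not in markov: markov[(w1, w2, w3)] = []
        let m1 := if markov.contains (w1, w2, w3) then markov else markov.insert (w1, w2, w3) []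
        -- markov[(w1, w2, w3)].append(word)
        m1.modify (w1, w2, w3) [] (fun l => l ++ [word])
      else markov
    genmarkov3Loop markov' w2 w3 word rest

def genmarkov3 (wordlist : List String) : List (String × String × String × List String) :=
  -- dict with tuple keys rendered as the required flat quadruple (k1, k2, k3, value)
  ((genmarkov3Loop PySem.Dict.empty "" "" "" wordlist).items).map
    (fun p => (p.1.1, p.1.2.1, p.1.2.2, p.2))

-- ===== PORT B =====
-- Source B: index comprehension over range(len(words)-3); every index it produces is in range,
-- so pyGetD's default "" is never used (exact).
def genmarkov3_alt (wordlist : List String) : List (String × String × String × List String) :=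
  let words := wordlist
  let quads : List (String × String × String × String) :=
    (PySem.List.pyRange 0 ((words.length : Int) - 3) 1).filterMap (fun i =>
      if PySem.List.pyGetD words i "" ≠ "" ∧ PySem.List.pyGetD words (i + 1) "" ≠ "" ∧
          PySem.List.pyGetD words (i + 2) "" ≠ "" then
        some (PySem.List.pyGetD words i "", PySem.List.pyGetD words (i + 1) "",
              PySem.List.pyGetD words (i + 2) "", PySem.List.pyGetD words (i + 3) "")
      else none)
  let markov := quads.foldl (fun d q =>
      -- markov.setdefault((w1, w2, w3), []).append(nxt)
      (d.setdefault (q.1, q.2.1, q.2.2.1) []).modify (q.1, q.2.1, q.2.2.1) []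
        (fun l => l ++ [q.2.2.2]))
    PySem.Dict.empty
  markov.items.map (fun p => (p.1.1, p.1.2.1, p.1.2.2, p.2))

-- ===== PRECONDITION & SPEC =====
def Spec_genmarkov3 (wordlist : List String) (out : List (String × String × String × List String)) : Prop := out = genmarkov3_alt wordlist
instance (wordlist : List String) (out : List (String × String × String × List String)) : Decidable (Spec_genmarkov3 wordlist out) := by unfold Spec_genmarkov3; infer_instance

-- ===== CLAIM (what is proved, stated in full; the proofs are below) =====
def Claim_equal_genmarkov3 : Prop := ∀ (wordlist : List String), Dom_genmarkov3 wordlist → Spec_genmarkov3 wordlist (genmarkov3 wordlist)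

-- ===== LEMMAS AND PROOFS =====

-- B's dict-filling step, named for the proofs.
def mstep (d : PySem.Dict (String × String × String) (List String))
    (q : String × String × String × String) :
    PySem.Dict (String × String × String) (List String) :=
  (d.setdefault (q.1, q.2.1, q.2.2.1) []).modify (q.1, q.2.1, q.2.2.1) [] (fun l => l ++ [q.2.2.2])

-- A's "if key not in d: d[key] = []" equals setdefault.
theorem stepA_eq_setdefault (d : PySem.Dict (String × String × String) (List String))
    (k : String × String × String) :
    (if d.contains k then d else d.insert k []) = d.setdefault k [] := by
  by_cases h : d.contains k <;> simp [PySem.Dict.insert, PySem.Dict.setdefault, h]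

-- the guarded sliding-window quadruples of a list, recursively
def quadsRec : List String → List (String × String × String × String)
  | a :: rest =>
    match rest with
    | b :: c :: d :: _ =>
      (if a ≠ "" ∧ b ≠ "" ∧ c ≠ "" then [(a, b, c, d)] else []) ++ quadsRec rest
    | _ => []
  | [] => []

theorem loop_eq_foldl (ws : List String) :
    ∀ (d : PySem.Dict (String × String × String) (List String)) (w1 w2 w3 : String),
    genmarkov3Loop d w1 w2 w3 ws = (quadsRec (w1 :: w2 :: w3 :: ws)).foldl mstep d := by
  induction ws with
  | nil => intro d w1 w2 w3; simp [genmarkov3Loop, quadsRec]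
  | cons w t ih =>
    intro d w1 w2 w3
    simp only [genmarkov3Loop, ih]
    show _ = ((if w1 ≠ "" ∧ w2 ≠ "" ∧ w3 ≠ "" then [(w1, w2, w3, w)] else []) ++
        quadsRec (w2 :: w3 :: w :: t)).foldl mstep d
    by_cases h : w1 ≠ "" ∧ w2 ≠ "" ∧ w3 ≠ "" <;>
      simp [h, mstep, stepA_eq_setdefault]

theorem quadsRec_pad (ws : List String) :
    quadsRec ("" :: "" :: "" :: ws) = quadsRec ws := by
  match ws with
  | [] => rfl
  | [a] => rfl
  | [a, b] => rfl
  | a :: b :: c :: t => simp [quadsRec]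

-- Nat-indexed form of Source B's comprehension
def quadsNat (xs : List String) : List (String × String × String × String) :=
  (List.range (xs.length - 3)).filterMap (fun k =>
    if xs.getD k "" ≠ "" ∧ xs.getD (k + 1) "" ≠ "" ∧ xs.getD (k + 2) "" ≠ "" then
      some (xs.getD k "", xs.getD (k + 1) "", xs.getD (k + 2) "", xs.getD (k + 3) "")
    else none)

theorem quadsNat_eq_rec (xs : List String) : quadsNat xs = quadsRec xs := by
  match xs with
  | [] => rfl
  | [a] => rfl
  | [a, b] => rfl
  | [a, b, c] => rfl
  | a :: b :: c :: d :: t =>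
    have ih := quadsNat_eq_rec (b :: c :: d :: t)
    unfold quadsNat at *
    have hlen : (a :: b :: c :: d :: t).length - 3 = ((b :: c :: d :: t).length - 3) + 1 := by
      simp
    rw [hlen, List.range_succ_eq_map, List.filterMap_cons, List.filterMap_map]
    rw [quadsRec, ← ih]
    by_cases h : a ≠ "" ∧ b ≠ "" ∧ c ≠ "" <;> simp [h]
termination_by xs.length

theorem altq (ws : List String) :
    (PySem.List.pyRange 0 ((ws.length : Int) - 3) 1).filterMap (fun i =>
      if PySem.List.pyGetD ws i "" ≠ "" ∧ PySem.List.pyGetD ws (i + 1) "" ≠ "" ∧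
          PySem.List.pyGetD ws (i + 2) "" ≠ "" then
        some (PySem.List.pyGetD ws i "", PySem.List.pyGetD ws (i + 1) "",
              PySem.List.pyGetD ws (i + 2) "", PySem.List.pyGetD ws (i + 3) "")
      else none) = quadsNat ws := by
  rw [PySem.List.pyRange_one]
  have h0 : ((ws.length : Int) - 3 - 0).toNat = ws.length - 3 := by omega
  rw [h0, List.filterMap_map, quadsNat]
  apply List.filterMap_congr
  intro k _
  have c1 : (0 : Int) + (k : Int) = ((k : Nat) : Int) := by push_cast; ring
  have c2 : (k : Int) + 1 = ((k + 1 : Nat) : Int) := by push_cast; ring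
  have c3 : (k : Int) + 2 = ((k + 2 : Nat) : Int) := by push_cast; ring
  have c4 : (k : Int) + 3 = ((k + 3 : Nat) : Int) := by push_cast; ring
  simp only [Function.comp, c1, c2, c3, c4, PySem.List.pyGetD_natCast]

theorem alt_eq (ws : List String) :
    genmarkov3_alt ws = (((quadsNat ws).foldl mstep PySem.Dict.empty).items).map
      (fun p => (p.1.1, p.1.2.1, p.1.2.2, p.2)) := by
  simp only [genmarkov3_alt]
  rw [altq]
  rfl

-- ===== VERDICT (by name: the statement is the Claim_ definition above) =====
theorem genmarkov3_spec : Claim_equal_genmarkov3 := by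
  intro ws _
  show genmarkov3 ws = genmarkov3_alt ws
  rw [genmarkov3, loop_eq_foldl, quadsRec_pad, alt_eq, quadsNat_eq_rec]
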